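-- pv_equiv track=rewrite | github.com/dgonzalezarbelo/Codigo-TFG-Informatica | syntactic.py | reduce
-- ===== SOURCE A (Python) =====
-- K = 4 # Tamaño del clique
--
-- def is_prefix(f, g) :
--     if len(f) > len(g) : return False
--     else : return f == g[:len(f)]
--
-- def reduce(f, k = (K * (K-1) // 2), use_not = True) :
--     l = len(f)
--     for i in range(l) :
--         f[i] = list(set(f[i]))
--         f[i].sort()
--
--     # Ordenamos las cláusulas para luego hacer fácilmente la absorción de cláusulas inútiles
--     f.sort()
--
--     # Quitar elementos que no aportan informacion
--     res = []
--     # Vamos a marcar las cláusulas inútiles (por absorción o por ser demasiado largas en caso de no usar puertas NOT)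
--     mark = [False] * l
--
--     '''ESTE FOR SOLO CUANDO NO HAY NOTS'''
--     if not use_not:
--         for i in range(l) :
--             if len(f[i]) > k : mark[i] = True
--
--     for i in range(l) :
--         if mark[i] : continue
--         # Si la cláusula i es prefijo de la j, al combinarlas con OR se absorbe la j, así que no nos sirve
--         for j in range(i+1, l) :
--             if is_prefix(f[i], f[j]) : mark[j] = True
--         res.append(f[i])
--     return res
-- ===== SOURCE B (Python) =====
-- K = 4 # Tamaño del clique
--
-- def reduce(f, k = (K * (K-1) // 2), use_not = True) :
--     # Single pass over the sorted clause list: in lexicographic order every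
--     # clause absorbed by some kept clause is absorbed by the LAST kept one,
--     # since the extensions of a prefix form a contiguous block.
--     clauses = sorted(sorted(set(c)) for c in f)
--     res = []
--     last = None
--     for c in clauses :
--         if not use_not and len(c) > k : continue
--         if last is not None and c[:len(last)] == last : continue
--         res.append(c)
--         last = c
--     return res
-- ===== Notes on version B (the rewrite author's own statement) =====
-- stated objective: faster
-- what changed: A marks absorbed clauses with a quadratic nested scan over all later clauses; B makes a single pass over the sorted clause list comparing each clause only to the last kept one (prefix-extensions form a contiguous block in lexicographic order). Return value only: A also sorts its argument in place, B does not mutate it.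
import Mathlib
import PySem

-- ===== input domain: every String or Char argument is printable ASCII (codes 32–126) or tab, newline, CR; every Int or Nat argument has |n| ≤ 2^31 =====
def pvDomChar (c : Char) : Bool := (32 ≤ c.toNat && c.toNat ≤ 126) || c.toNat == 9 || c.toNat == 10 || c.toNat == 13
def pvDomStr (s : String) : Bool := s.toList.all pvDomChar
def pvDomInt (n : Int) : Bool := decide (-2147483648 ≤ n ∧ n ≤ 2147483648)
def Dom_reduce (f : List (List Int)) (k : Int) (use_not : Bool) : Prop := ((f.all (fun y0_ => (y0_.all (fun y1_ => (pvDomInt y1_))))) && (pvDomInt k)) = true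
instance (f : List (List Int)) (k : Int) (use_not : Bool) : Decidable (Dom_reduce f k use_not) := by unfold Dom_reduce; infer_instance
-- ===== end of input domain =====

-- B replaces A's quadratic mark-and-absorb nested scan by a single pass over the
-- sorted clause list comparing each clause to the last kept one (objective: faster).
-- Equivalence is about the RETURN value only: the Python A sorts its argument f in place.

-- ===== PORT A =====
-- is_prefix(f, g)
def isPrefixPy (f g : List Int) : Bool :=
  if PySem.List.len f > PySem.List.len g then false
  else f == PySem.List.slice g none (some (PySem.List.len f))

-- f[i] = list(set(f[i])); f[i].sort()
def normClause (c : List Int) : List Int :=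
  PySem.List.sorted (PySem.Set.ofList c) (fun x => x) false

-- the two nested marking loops: the state is the still-unvisited clauses paired
-- with their marks; a kept clause marks every later clause it is a prefix of
def reduceLoopA : List (List Int × Bool) → List (List Int)
  | [] => []
  | (c, m) :: rest =>
    if m then reduceLoopA rest
    else c :: reduceLoopA (rest.map (fun p => (p.1, p.2 || isPrefixPy c p.1)))
termination_by l => l.length
decreasing_by all_goals simp

def reduce (f : List (List Int)) (k : Int) (use_not : Bool) : List (List Int) :=
  let fs := PySem.List.sorted (f.map normClause) (fun x => x) false
  -- mark = [False]*l, then (only without NOT gates) mark the too-long clauses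
  let mark := if !use_not then fs.map (fun c => decide (PySem.List.len c > k))
              else List.replicate fs.length false
  reduceLoopA (fs.zip mark)

-- ===== PORT B =====
def reduce_alt (f : List (List Int)) (k : Int) (use_not : Bool) : List (List Int) :=
  let clauses := PySem.List.sorted
    (f.map (fun c => PySem.List.sorted (PySem.Set.ofList c) (fun x => x) false))
    (fun x => x) false
  (clauses.foldl (fun acc c =>
      if !use_not && decide (PySem.List.len c > k) then acc
      else match acc.2 with
        | some last =>
          if PySem.List.slice c none (some (PySem.List.len last)) == last then acc
          else (acc.1 ++ [c], some c)
        | none => (acc.1 ++ [c], some c))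
    ([], none)).1

-- ===== PRECONDITION & SPEC =====
def Spec_reduce (f : List (List Int)) (k : Int) (use_not : Bool) (out : List (List Int)) : Prop := out = reduce_alt f k use_not
instance (f : List (List Int)) (k : Int) (use_not : Bool) (out : List (List Int)) : Decidable (Spec_reduce f k use_not out) := by unfold Spec_reduce; infer_instance

-- ===== CLAIM (what is proved, stated in full; the proofs are below) =====
def Claim_equal_reduce : Prop := ∀ (f : List (List Int)) (k : Int) (use_not : Bool), Dom_reduce f k use_not → Spec_reduce f k use_not (reduce f k use_not)

-- ===== LEMMAS AND PROOFS =====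

-- proof-side helpers --------------------------------------------------------

def initM (k : Int) (use_not : Bool) (d : List Int) : Bool :=
  !use_not && decide (PySem.List.len d > k)

def optPref : Option (List Int) → List Int → Bool
  | none, _ => false
  | some p, d => isPrefixPy p d

def optLe : Option (List Int) → List Int → Prop
  | none, _ => True
  | some p, d => p ≤ d

-- B's loop as a structural recursion on the clause list, carrying the last kept clause
def loopB (k : Int) (use_not : Bool) : Option (List Int) → List (List Int) → List (List Int)
  | _, [] => []
  | last, c :: rest =>
    if initM k use_not c then loopB k use_not last rest
    else if optPref last c then loopB k use_not last rest
    else c :: loopB k use_not (some c) rest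

-- basic characterisations ---------------------------------------------------

lemma slice_take (c : List Int) (n : Nat) :
    PySem.List.slice c none (some ((n : Nat) : Int)) = c.take n := by
  simp [pysem]

lemma isPrefixPy_iff (p g : List Int) : isPrefixPy p g = true ↔ p <+: g := by
  unfold isPrefixPy
  by_cases h : PySem.List.len p > PySem.List.len g
  · simp only [h, if_true]
    constructor
    · intro hc; cases hc
    · intro hpre
      have := hpre.length_le
      simp [PySem.List.len_eq] at h
      omega
  · simp only [h, if_false]
    have : PySem.List.slice g none (some (PySem.List.len p)) = g.take p.length := by
      simpa [PySem.List.len_eq] using slice_take g p.length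
    rw [this, beq_iff_eq, List.prefix_iff_eq_take]

lemma beq_slice_eq (p c : List Int) :
    (PySem.List.slice c none (some (PySem.List.len p)) == p) = isPrefixPy p c := by
  have hs : PySem.List.slice c none (some (PySem.List.len p)) = c.take p.length := by
    simpa [PySem.List.len_eq] using slice_take c p.length
  by_cases h : p <+: c
  · have h1 : isPrefixPy p c = true := (isPrefixPy_iff p c).mpr h
    have h2 : p = c.take p.length := List.prefix_iff_eq_take.mp h
    rw [hs, h1, ← h2, beq_self_eq_true]
  · have h1 : isPrefixPy p c = false := by
      cases hb : isPrefixPy p c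
      · rfl
      · exact absurd ((isPrefixPy_iff p c).mp hb) h
    have h2 : c.take p.length ≠ p := by
      intro he; exact h (List.prefix_iff_eq_take.mpr he.symm)
    rw [hs, h1, beq_eq_false_iff_ne]
    exact h2

-- the lexicographic absorption lemma ---------------------------------------

lemma lex_append_lt (p c t : List Int) (h : List.Lex (· < ·) p c) (hp : ¬ p <+: c) :
    List.Lex (· < ·) (p ++ t) c := by
  induction h with
  | nil => exact absurd (List.nil_prefix) hp
  | @rel a l b l' hab => exact List.Lex.rel hab
  | @cons a l l' h ih =>
    exact List.Lex.cons (ih (fun hpre => hp (List.cons_prefix_cons.mpr ⟨rfl, hpre⟩)))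

lemma prefix_between (p c d : List Int) (h1 : p ≤ c) (h2 : c ≤ d) (hpd : p <+: d) :
    p <+: c := by
  by_contra hpc
  rcases lt_or_eq_of_le h1 with hlt | heq
  · have hlex : List.Lex (· < ·) p c := hlt
    obtain ⟨t, rfl⟩ := hpd
    have hlt2 : p ++ t < c := lex_append_lt p c t hlex hpc
    exact absurd hlt2 (not_lt.mpr h2)
  · exact hpc (heq ▸ List.prefix_refl p)

-- the loop equivalence ------------------------------------------------------

lemma loopA_eq (k : Int) (un : Bool) :
    ∀ (l : List (List Int)) (last : Option (List Int)),
      l.Pairwise (· ≤ ·) → (∀ d ∈ l, optLe last d) →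
      reduceLoopA (l.map (fun d => (d, initM k un d || optPref last d))) =
        loopB k un last l := by
  intro l
  induction l with
  | nil => intro last _ _; simp [reduceLoopA, loopB]
  | cons c rest ih =>
    intro last hpw hle
    obtain ⟨hc, hrest⟩ := List.pairwise_cons.mp hpw
    have hlec : optLe last c := hle c (by simp)
    by_cases hm : (initM k un c || optPref last c) = true
    · -- the head is marked: both sides skip it, state unchanged
      rw [List.map_cons, reduceLoopA, if_pos hm]
      have hrhs : loopB k un last (c :: rest) = loopB k un last rest := by
        rcases Bool.or_eq_true_iff.mp hm with h1 | h2
        · rw [loopB, if_pos h1]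
        · rw [loopB]
          by_cases h1 : initM k un c = true
          · rw [if_pos h1]
          · rw [if_neg h1, if_pos h2]
      rw [hrhs]
      exact ih last hrest (fun d hd => hle d (by simp [hd]))
    · -- the head is kept
      have hi : initM k un c ≠ true := fun h => hm (Bool.or_eq_true_iff.mpr (Or.inl h))
      have hp : optPref last c = false := by
        cases hh : optPref last c
        · rfl
        · exact absurd (Bool.or_eq_true_iff.mpr (Or.inr hh)) hm
      rw [List.map_cons, reduceLoopA, if_neg hm, List.map_map]
      have hmapeq :
          rest.map ((fun p : List Int × Bool => (p.1, p.2 || isPrefixPy c p.1)) ∘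
              (fun d => (d, initM k un d || optPref last d))) =
          rest.map (fun d => (d, initM k un d || optPref (some c) d)) := by
        apply List.map_congr_left
        intro d hd
        simp only [Function.comp]
        have hlast : optPref last d = false := by
          cases last with
          | none => rfl
          | some p =>
            cases hh : isPrefixPy p d
            · simp [optPref, hh]
            · -- p is a prefix of d, p ≤ c ≤ d ⇒ p is a prefix of c: contradicts hp
              have hpd : p <+: d := (isPrefixPy_iff p d).mp hh
              have hpc : p <+: c := prefix_between p c d hlec (hc d hd) hpd
              have : optPref (some p) c = true := (isPrefixPy_iff p c).mpr hpc
              rw [hp] at this; cases this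
        rw [hlast]
        simp [optPref]
      rw [hmapeq]
      rw [loopB, if_neg hi, hp, if_neg (by simp)]
      congr 1
      exact ih (some c) hrest (fun d hd => hc d hd)

-- B's foldl produces loopB --------------------------------------------------

lemma foldl_loopB (k : Int) (un : Bool) :
    ∀ (l : List (List Int)) (res : List (List Int)) (last : Option (List Int)),
      (l.foldl (fun acc c =>
        if !un && decide (PySem.List.len c > k) then acc
        else match acc.2 with
          | some last =>
            if PySem.List.slice c none (some (PySem.List.len last)) == last then acc
            else (acc.1 ++ [c], some c)
          | none => (acc.1 ++ [c], some c))
        (res, last)).1 = res ++ loopB k un last l := by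
  intro l
  induction l with
  | nil => intro res last; simp [loopB]
  | cons c rest ih =>
    intro res last
    rw [List.foldl_cons]
    by_cases h1 : (!un && decide (PySem.List.len c > k)) = true
    · rw [if_pos h1]
      rw [loopB, if_pos (by simpa [initM] using h1)]
      exact ih res last
    · rw [if_neg h1]
      rw [loopB, if_neg (by simpa [initM] using h1)]
      cases last with
      | none =>
        simp only [optPref, Bool.false_eq_true, if_false]
        rw [ih (res ++ [c]) (some c), List.append_assoc]
        rfl
      | some p =>
        simp only [optPref]
        by_cases h2 : isPrefixPy p c = true
        · rw [if_pos h2]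
          have : (PySem.List.slice c none (some (PySem.List.len p)) == p) = true := by
            rw [beq_slice_eq]; exact h2
          simp only [this, if_true]
          exact ih res (some p)
        · rw [if_neg h2]
          have : (PySem.List.slice c none (some (PySem.List.len p)) == p) = false := by
            rw [beq_slice_eq]; exact Bool.not_eq_true _ ▸ Bool.eq_false_iff.mpr h2
          simp only [this, Bool.false_eq_true, if_false]
          rw [ih (res ++ [c]) (some c), List.append_assoc]
          rfl

-- initial mark list ---------------------------------------------------------

lemma zip_self_map (g : List Int → Bool) (xs : List (List Int)) :
    xs.zip (xs.map g) = xs.map (fun d => (d, g d)) := by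
  induction xs with
  | nil => rfl
  | cons x t ih => simp [ih]

lemma zip_marks (k : Int) (un : Bool) (fs : List (List Int)) :
    fs.zip (if !un then fs.map (fun c => decide (PySem.List.len c > k))
            else List.replicate fs.length false) =
    fs.map (fun d => (d, initM k un d)) := by
  cases un with
  | false =>
    simp only [Bool.not_false, if_true, initM]
    exact zip_self_map _ fs
  | true =>
    simp only [Bool.not_true, Bool.false_eq_true, if_false, initM]
    rw [← List.map_const']
    exact zip_self_map _ fs

-- the port's sorted elaborates with core's List LT instance; bridge to the
-- LinearOrder instance of PySem.List.sorted_pairwise (the orders are defeq)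
lemma sorted_core_pairwise (xs : List (List Int)) :
    (@PySem.List.sorted (List Int) (List Int) List.instLT (fun a b => a.decidableLT b)
      xs (fun x => x) false).Pairwise (· ≤ ·) := by
  have he : @PySem.List.sorted (List Int) (List Int) List.instLT (fun a b => a.decidableLT b)
        xs (fun x => x) false =
      @PySem.List.sorted (List Int) (List Int) List.instLinearOrder.toLT
        LinearOrder.toDecidableLT xs (fun x => x) false := by
    congr 1
  rw [he]
  exact @PySem.List.sorted_pairwise (List Int) (List Int) List.instLinearOrder xs (fun x => x)

-- ===== VERDICT (by name: the statement is the Claim_ definition above) =====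
theorem reduce_spec : Claim_equal_reduce := by
  intro f k un _
  unfold Spec_reduce reduce reduce_alt
  simp only []
  set fs := PySem.List.sorted (f.map normClause) (fun x => x) false with hfs
  have hsame : PySem.List.sorted
      (f.map (fun c => PySem.List.sorted (PySem.Set.ofList c) (fun x => x) false))
      (fun x => x) false = fs := by
    rw [hfs]; rfl
  rw [hsame, foldl_loopB k un fs [] none, List.nil_append]
  rw [zip_marks k un fs]
  have hpair : fs.Pairwise (· ≤ ·) := sorted_core_pairwise (f.map normClause)
  have : fs.map (fun d => (d, initM k un d)) =
      fs.map (fun d => (d, initM k un d || optPref none d)) := by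
    simp [optPref]
  rw [this]
  exact loopA_eq k un fs none hpair (fun d _ => trivial)
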